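-- pv_equiv track=rewrite | github.com/TheAngelLCF/corriges_nsi_pratique_2022 | 22_NSI_37/22-NSI-37.py | depouille
-- ===== SOURCE A (Python) =====
-- def depouille(urne):
--     resultat = {}
--     for bulletin in urne:
--         if bulletin in list(resultat.keys()):
--             resultat[bulletin] = resultat[bulletin] + 1
--         else:
--             resultat[bulletin] = 1
--     return resultat
-- ===== SOURCE B (Python) =====
-- def depouille(urne):
--     # Two staged passes instead of one accumulating pass:
--     # 1) the distinct ballots in first-appearance order (dict.fromkeys dedup),
--     # 2) for each distinct ballot, its total via a full urne.count rescan.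
--     ordre = list(dict.fromkeys(urne))
--     return {bulletin: urne.count(bulletin) for bulletin in ordre}
-- ===== Notes on version B (the rewrite author's own statement) =====
-- stated objective: idiomatic
-- what changed: Replaces A's single accumulating pass over a growing dict (membership test on the key list, then increment-or-initialise) by two staged passes: dedupe the urn into first-appearance order with dict.fromkeys, then map each distinct ballot to its total via a full urne.count rescan; no running counter is maintained at all.
import Mathlib
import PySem

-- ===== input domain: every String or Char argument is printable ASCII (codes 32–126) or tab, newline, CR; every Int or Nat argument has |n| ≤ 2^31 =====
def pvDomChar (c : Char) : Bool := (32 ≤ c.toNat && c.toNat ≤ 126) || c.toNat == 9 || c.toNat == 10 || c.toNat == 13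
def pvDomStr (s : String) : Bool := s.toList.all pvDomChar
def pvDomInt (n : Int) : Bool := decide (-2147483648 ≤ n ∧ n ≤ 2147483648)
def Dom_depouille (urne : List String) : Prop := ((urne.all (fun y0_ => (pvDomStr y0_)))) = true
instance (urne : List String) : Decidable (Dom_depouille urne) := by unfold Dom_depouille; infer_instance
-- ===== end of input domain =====

-- B replaces A's accumulating pass over a growing dict by two staged passes:
-- dedupe the urn (first-appearance order), then map each distinct ballot to its
-- total with urne.count; more idiomatic, same result.

-- ===== PORT A =====
-- the lookup resultat[bulletin] is guarded by the membership test, so the key is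
-- present and getD … 0 returns exactly the stored value (no default is ever used)
def depouille (urne : List String) : List (String × Int) :=
  (urne.foldl (fun resultat bulletin =>
      if (PySem.Dict.keys resultat).contains bulletin then
        resultat.insert bulletin (resultat.getD bulletin 0 + 1)
      else
        resultat.insert bulletin 1)
    (PySem.Dict.empty : PySem.Dict String Int)).items

-- ===== PORT B =====
-- list(dict.fromkeys(urne)) = PySem.List.dedup; the comprehension's keys (ordre)
-- are distinct, so the resulting dict's items are exactly this pair list.
def depouille_alt (urne : List String) : List (String × Int) :=
  (PySem.List.dedup urne).map (fun bulletin => (bulletin, (urne.count bulletin : Int)))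

-- ===== PRECONDITION & SPEC =====
def Spec_depouille (urne : List String) (out : List (String × Int)) : Prop := out = depouille_alt urne
instance (urne : List String) (out : List (String × Int)) : Decidable (Spec_depouille urne out) := by unfold Spec_depouille; infer_instance

-- ===== CLAIM =====
def Claim_equal_depouille : Prop := ∀ (urne : List String), Dom_depouille urne → Spec_depouille urne (depouille urne)

-- ===== LEMMAS AND PROOFS =====

-- A's loop body always inserts the incremented count (the else-branch value 1 is 0 + 1)
theorem depouille_step_eq (d : PySem.Dict String Int) (b : String) :
    (if (PySem.Dict.keys d).contains b then
      d.insert b (d.getD b 0 + 1)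
    else
      d.insert b 1)
    = d.insert b (d.getD b 0 + 1) := by
  have hmem : ((PySem.Dict.keys d).contains b = true) ↔ d.contains b = true := by
    rw [PySem.Dict.contains_iff_mem_keys]; simp
  by_cases hc : d.contains b = true
  · rw [if_pos (hmem.2 hc)]
  · have hc' : d.contains b = false := eq_false_of_ne_true hc
    rw [if_neg (fun hkk => hc (hmem.1 hkk)), PySem.Dict.getD_of_not_contains d 0 hc']
    norm_num

-- ===== VERDICT =====
theorem depouille_spec : Claim_equal_depouille := by
  intro urne _
  unfold Spec_depouille depouille depouille_alt
  have h : (urne.foldl (fun resultat bulletin =>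
      if (PySem.Dict.keys resultat).contains bulletin then
        resultat.insert bulletin (resultat.getD bulletin 0 + 1)
      else
        resultat.insert bulletin 1)
    (PySem.Dict.empty : PySem.Dict String Int))
    = urne.foldl (fun d x => d.insert x (d.getD x 0 + 1)) PySem.Dict.empty := by
    congr 1
    funext d b
    exact depouille_step_eq d b
  rw [h, PySem.Dict.foldl_insert_getD_add_one_eq_counter, PySem.Dict.items_counter,
    PySem.List.dedup_eq_ofList]
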